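-- pv_equiv track=rewrite | github.com/HirulaAbesignha/diabetic_retinopathy_preprocessing | notebooks/IT24100259_data_loading&missing_data.py | analyze_missing_data
-- ===== SOURCE A (Python) =====
-- def analyze_missing_data(samples):
--     #Analyze missing data
--     missing_images = missing_labels = valid_samples = 0
--
--     for sample in samples:
--         if 'image' not in sample or sample['image'] is None:
--             missing_images += 1
--         elif 'label' not in sample or sample['label'] is None:
--             missing_labels += 1
--         else:
--             valid_samples += 1
--
--     return {
--         'valid_samples': valid_samples,
--         'missing_images': missing_images,
--         'missing_labels': missing_labels,
--         'total_samples': len(samples)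
--     }
-- ===== SOURCE B (Python) =====
-- def analyze_missing_data(samples):
--     # Same result via three independent counting passes instead of one accumulating loop.
--     def image_missing(sample):
--         return 'image' not in sample or sample['image'] is None
--
--     def label_missing(sample):
--         return 'label' not in sample or sample['label'] is None
--
--     missing_images = sum(1 for s in samples if image_missing(s))
--     missing_labels = sum(1 for s in samples if not image_missing(s) and label_missing(s))
--     return {
--         'valid_samples': len(samples) - missing_images - missing_labels,
--         'missing_images': missing_images,
--         'missing_labels': missing_labels,
--         'total_samples': len(samples)
--     }
-- ===== Notes on version B (the rewrite author's own statement) =====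
-- stated objective: alternative
-- what changed: Replaces the single loop with a three-way branching accumulator by two independent counting passes (missing images; labels missing among image-present samples) and derives valid_samples by subtraction from the total.
import Mathlib
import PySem

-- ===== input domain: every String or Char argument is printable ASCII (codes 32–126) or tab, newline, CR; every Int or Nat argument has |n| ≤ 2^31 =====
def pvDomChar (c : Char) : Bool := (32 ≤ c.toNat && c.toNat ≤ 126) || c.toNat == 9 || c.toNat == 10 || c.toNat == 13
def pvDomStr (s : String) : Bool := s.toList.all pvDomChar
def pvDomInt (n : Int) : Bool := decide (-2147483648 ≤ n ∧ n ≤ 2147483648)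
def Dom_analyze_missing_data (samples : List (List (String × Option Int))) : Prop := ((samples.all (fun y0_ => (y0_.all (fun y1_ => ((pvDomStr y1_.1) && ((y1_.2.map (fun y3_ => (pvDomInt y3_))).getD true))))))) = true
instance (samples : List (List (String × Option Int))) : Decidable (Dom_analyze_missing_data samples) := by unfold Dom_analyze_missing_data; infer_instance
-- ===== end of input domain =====

-- ===== PORT A =====
-- B differs from A by decomposition: two independent counting passes plus subtraction, instead of one 3-way accumulating loop.
def analyze_missing_data (samples : List (List (String × Option Int))) : List (String × Int) :=
  let acc := samples.foldl (fun (acc : Int × Int × Int) sample =>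
    let d := PySem.Dict.mk sample
    if !(d.contains "image") || d.get? "image" == some none then
      (acc.1 + 1, acc.2.1, acc.2.2)
    else if !(d.contains "label") || d.get? "label" == some none then
      (acc.1, acc.2.1 + 1, acc.2.2)
    else
      (acc.1, acc.2.1, acc.2.2 + 1)) (0, 0, 0)
  [("valid_samples", acc.2.2), ("missing_images", acc.1),
   ("missing_labels", acc.2.1), ("total_samples", (samples.length : Int))]

-- ===== PORT B =====
def pvImageMissing (sample : List (String × Option Int)) : Bool :=
  let d := PySem.Dict.mk sample
  !(d.contains "image") || d.get? "image" == some none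

def pvLabelMissing (sample : List (String × Option Int)) : Bool :=
  let d := PySem.Dict.mk sample
  !(d.contains "label") || d.get? "label" == some none

def analyze_missing_data_alt (samples : List (List (String × Option Int))) : List (String × Int) :=
  let missing_images : Int := (samples.countP pvImageMissing : Nat)
  let missing_labels : Int :=
    (samples.countP (fun s => !pvImageMissing s && pvLabelMissing s) : Nat)
  [("valid_samples", (samples.length : Int) - missing_images - missing_labels),
   ("missing_images", missing_images),
   ("missing_labels", missing_labels),
   ("total_samples", (samples.length : Int))]

-- ===== PRECONDITION & SPEC =====
def Spec_analyze_missing_data (samples : List (List (String × Option Int))) (out : List (String × Int)) : Prop := out = analyze_missing_data_alt samples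
instance (samples : List (List (String × Option Int))) (out : List (String × Int)) : Decidable (Spec_analyze_missing_data samples out) := by unfold Spec_analyze_missing_data; infer_instance

-- ===== CLAIM (what is proved, stated in full; the proofs are below) =====
def Claim_equal_analyze_missing_data : Prop := ∀ (samples : List (List (String × Option Int))), Dom_analyze_missing_data samples → Spec_analyze_missing_data samples (analyze_missing_data samples)

-- ===== LEMMAS AND PROOFS =====
def pvStep (acc : Int × Int × Int) (sample : List (String × Option Int)) : Int × Int × Int :=
  if pvImageMissing sample then (acc.1 + 1, acc.2.1, acc.2.2)
  else if pvLabelMissing sample then (acc.1, acc.2.1 + 1, acc.2.2)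
  else (acc.1, acc.2.1, acc.2.2 + 1)

lemma analyze_fold_spec (samples : List (List (String × Option Int)))
    (mi ml vs : Int) :
    samples.foldl pvStep (mi, ml, vs)
    = (mi + (samples.countP pvImageMissing : Nat),
       ml + (samples.countP (fun s => !pvImageMissing s && pvLabelMissing s) : Nat),
       vs + ((samples.length : Int)
             - (samples.countP pvImageMissing : Nat)
             - (samples.countP (fun s => !pvImageMissing s && pvLabelMissing s) : Nat))) := by
  induction samples generalizing mi ml vs with
  | nil => simp
  | cons s rest ih =>
    simp only [List.foldl_cons, List.countP_cons, List.length_cons, pvStep]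
    cases hI : pvImageMissing s <;> cases hL : pvLabelMissing s <;>
      simp only [hI, hL, if_true, if_false, Bool.not_true, Bool.not_false,
        Bool.true_and, Bool.false_and, Bool.and_true, Bool.and_false,
        ite_true, ite_false, Bool.false_eq_true, ih, Prod.mk.injEq] <;>
      refine ⟨by push_cast; ring, by push_cast; ring, by push_cast; ring⟩

-- ===== VERDICT (by name: the statement is the Claim_ definition above) =====
theorem analyze_missing_data_spec : Claim_equal_analyze_missing_data := by
  intro samples _
  unfold Spec_analyze_missing_data analyze_missing_data analyze_missing_data_alt
  rw [show (fun (acc : Int × Int × Int) sample =>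
    let d := PySem.Dict.mk sample
    if !(d.contains "image") || d.get? "image" == some none then
      (acc.1 + 1, acc.2.1, acc.2.2)
    else if !(d.contains "label") || d.get? "label" == some none then
      (acc.1, acc.2.1 + 1, acc.2.2)
    else
      (acc.1, acc.2.1, acc.2.2 + 1)) = pvStep from rfl, analyze_fold_spec]
  simp
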